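-- pv_equiv track=rewrite | github.com/lengthwisehems/retail2 | favoritedaughter_inventory.py | determine_color_simplified
-- ===== SOURCE A (Python) =====
-- from typing import Any, Dict, Iterable, List, Optional, Sequence, Set, Tuple
--
-- def determine_color_simplified(tags: Sequence[str]) -> str:
--     tags_lower = [t.lower() for t in tags]
--     if any("dark" in tag or "black" in tag for tag in tags_lower):
--         return "Dark"
--     if any("light" in tag or "white" in tag for tag in tags_lower):
--         return "Light"
--     if any("medium" in tag for tag in tags_lower):
--         return "Medium"
--     return ""
-- ===== SOURCE B (Python) =====
-- def determine_color_simplified(tags):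
--     tags_lower = [t.lower() for t in tags]
--     light = medium = False
--     for tag in tags_lower:
--         if "dark" in tag or "black" in tag:
--             return "Dark"
--         if "light" in tag or "white" in tag:
--             light = True
--         elif "medium" in tag:
--             medium = True
--     return "Light" if light else ("Medium" if medium else "")
-- ===== Notes on version B (the rewrite author's own statement) =====
-- stated objective: simpler
-- what changed: Replaces three separate any-scans over the lowered tags with a single pass keeping light/medium flags and an early return for Dark.
import Mathlib
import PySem

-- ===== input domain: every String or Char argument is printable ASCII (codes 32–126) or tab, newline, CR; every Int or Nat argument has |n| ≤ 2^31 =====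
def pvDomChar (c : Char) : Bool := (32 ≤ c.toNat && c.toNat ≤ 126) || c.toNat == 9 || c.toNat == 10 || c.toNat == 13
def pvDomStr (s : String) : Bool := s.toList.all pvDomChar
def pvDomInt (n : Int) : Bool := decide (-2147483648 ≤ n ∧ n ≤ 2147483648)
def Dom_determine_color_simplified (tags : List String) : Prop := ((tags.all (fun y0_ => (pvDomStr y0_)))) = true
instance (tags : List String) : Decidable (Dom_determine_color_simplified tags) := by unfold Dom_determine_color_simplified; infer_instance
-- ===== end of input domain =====

-- B replaces A's three any-scans over the lowered tags with one pass keeping flags (simpler decomposition).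
-- ===== PORT A =====
def determine_color_simplified (tags : List String) : String :=
  let tags_lower := tags.map PySem.Str.lower
  if tags_lower.any (fun tag => PySem.Str.isIn "dark" tag || PySem.Str.isIn "black" tag) then "Dark"
  else if tags_lower.any (fun tag => PySem.Str.isIn "light" tag || PySem.Str.isIn "white" tag) then "Light"
  else if tags_lower.any (fun tag => PySem.Str.isIn "medium" tag) then "Medium"
  else ""

-- ===== PORT B =====
def dcsLoop : List String → Bool → Bool → String
  | [], light, medium => if light then "Light" else if medium then "Medium" else ""
  | tag :: rest, light, medium =>
    if PySem.Str.isIn "dark" tag || PySem.Str.isIn "black" tag then "Dark"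
    else if PySem.Str.isIn "light" tag || PySem.Str.isIn "white" tag then dcsLoop rest true medium
    else if PySem.Str.isIn "medium" tag then dcsLoop rest light true
    else dcsLoop rest light medium

def determine_color_simplified_alt (tags : List String) : String :=
  dcsLoop (tags.map PySem.Str.lower) false false

-- ===== PRECONDITION & SPEC =====
def Spec_determine_color_simplified (tags : List String) (out : String) : Prop := out = determine_color_simplified_alt tags
instance (tags : List String) (out : String) : Decidable (Spec_determine_color_simplified tags out) := by unfold Spec_determine_color_simplified; infer_instance

-- ===== CLAIM =====
def Claim_equal_determine_color_simplified : Prop := ∀ (tags : List String), Dom_determine_color_simplified tags → Spec_determine_color_simplified tags (determine_color_simplified tags)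

-- ===== LEMMAS AND PROOFS =====
theorem dcsLoop_eq (l : List String) (light medium : Bool) :
    dcsLoop l light medium =
      if l.any (fun t => PySem.Str.isIn "dark" t || PySem.Str.isIn "black" t) then "Dark"
      else if (light || l.any (fun t => PySem.Str.isIn "light" t || PySem.Str.isIn "white" t)) then "Light"
      else if (medium || l.any (fun t => PySem.Str.isIn "medium" t)) then "Medium"
      else "" := by
  induction l generalizing light medium with
  | nil => simp [dcsLoop]
  | cons t rest ih =>
    simp only [dcsLoop, List.any_cons]
    by_cases h1 : (PySem.Str.isIn "dark" t || PySem.Str.isIn "black" t) = true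
    · simp only [h1]; simp
    · rw [Bool.not_eq_true] at h1
      simp only [h1]; simp only [Bool.false_or]
      by_cases h2 : (PySem.Str.isIn "light" t || PySem.Str.isIn "white" t) = true
      · simp only [h2, ih]; simp
      · rw [Bool.not_eq_true] at h2
        simp only [h2]; simp only [Bool.false_or]
        by_cases h3 : PySem.Str.isIn "medium" t = true
        · simp only [h3, ih]; simp
        · rw [Bool.not_eq_true] at h3
          simp only [h3, ih]; simp

-- ===== VERDICT =====
theorem determine_color_simplified_spec : Claim_equal_determine_color_simplified := by
  intro tags _
  unfold Spec_determine_color_simplified determine_color_simplified determine_color_simplified_alt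
  rw [dcsLoop_eq]
  simp
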